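-- pv_equiv track=rewrite | github.com/WiktorDybalski/Python_projects-term_2-ASD | Exams/20-21/egzamin_2_szablony/zad3.py | lamps
-- ===== SOURCE A (Python) =====
-- def lamps(n, T):
--     lampss = ['G'] * n
--     cnt = 0
--     the_best = 0
--     for j in range(len(T)):
--         start = T[j][0]
--         end = T[j][1]
--         the_best = max(cnt, the_best)
--         for i in range(n):
--             if i > end:
--                 break
--             if end >= i >= start:
--                 if lampss[i] == 'G':
--                     lampss[i] = 'R'
--                 elif lampss[i] == 'R':
--                     lampss[i] = 'B'
--                     cnt += 1
--                 else:
--                     lampss[i] = 'G'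
--                     cnt -= 1
--         the_best = max(cnt, the_best)
--     return the_best
-- ===== SOURCE B (Python) =====
-- def lamps(n, T):
--     state = [0] * n  # number of toggles received, mod 3; 2 means blue
--     best = 0
--     for start, end in T:
--         lo = max(start, 0)
--         hi = min(end, n - 1)
--         if lo <= hi:
--             state[lo:hi + 1] = [(s + 1) % 3 for s in state[lo:hi + 1]]
--         best = max(best, state.count(2))
--     return best
-- ===== Notes on version B (the rewrite author's own statement) =====
-- stated objective: simpler
-- what changed: Replaces A's per-lamp character state-machine (inner scan over range(n) with break and an incrementally maintained blue counter) by a toggles-mod-3 integer list: each query clamps its range to [max(start,0), min(end,n-1)], rewrites just that slice with (s+1)%3, and recounts lamps in state 2.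
import Mathlib
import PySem

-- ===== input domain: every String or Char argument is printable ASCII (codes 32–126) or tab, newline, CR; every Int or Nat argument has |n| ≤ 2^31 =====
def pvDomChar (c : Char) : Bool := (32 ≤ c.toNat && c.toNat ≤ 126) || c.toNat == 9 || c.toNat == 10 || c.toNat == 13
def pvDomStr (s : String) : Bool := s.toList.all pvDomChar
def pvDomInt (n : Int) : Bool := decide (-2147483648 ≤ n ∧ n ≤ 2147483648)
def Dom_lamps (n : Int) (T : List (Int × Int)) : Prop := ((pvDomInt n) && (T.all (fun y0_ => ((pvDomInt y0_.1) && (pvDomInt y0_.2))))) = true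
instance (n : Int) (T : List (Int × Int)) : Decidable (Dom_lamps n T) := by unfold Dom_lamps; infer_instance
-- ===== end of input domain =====

-- B replaces A's char state-machine (break-based inner scan, incrementally maintained blue counter)
-- by a toggles-mod-3 integer list rebuilt per query with one enumerate comprehension and a recount;
-- objective: simpler (equal return values; A's list mutation is local, not observable).

-- ===== PORT A =====
-- inner loop 'for i in range(n): if i > end: break; …'; Python's list (O(1) index read/assign)
-- is ported as Array Char; every index i comes from range(n) and the array has size n (= len of
-- Python's lampss), so 0 ≤ i < size: getD / setIfInBounds are exact for Python's lampss[i] here.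
def lampsInnerA (start e : Int) : List Int → Array Char → Int → Array Char × Int
  | [], st, cnt => (st, cnt)
  | i :: is, st, cnt =>
    if i > e then (st, cnt)
    else if e ≥ i ∧ i ≥ start then
      (if st[i.toNat]?.getD ' ' = 'G' then
        lampsInnerA start e is (st.setIfInBounds i.toNat 'R') cnt
      else if st[i.toNat]?.getD ' ' = 'R' then
        lampsInnerA start e is (st.setIfInBounds i.toNat 'B') (cnt + 1)
      else
        lampsInnerA start e is (st.setIfInBounds i.toNat 'G') (cnt - 1))
    else lampsInnerA start e is st cnt

def lampsOuterA (n : Int) : List (Int × Int) → Array Char → Int → Int → Int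
  | [], _, _, best => best
  | se :: rest, st, cnt, best =>
    let best1 := max cnt best
    let r := lampsInnerA se.1 se.2 (PySem.List.pyRange 0 n 1) st cnt
    lampsOuterA n rest r.1 r.2 (max r.2 best1)

-- ['G'] * n is the array of n.toNat copies of 'G' (empty for n ≤ 0, as in Python)
def lamps (n : Int) (T : List (Int × Int)) : Int :=
  lampsOuterA n T (Array.replicate n.toNat 'G') 0 0

-- ===== PORT B =====
-- slice assignment state[lo:hi+1] = [...] with 0 ≤ lo ≤ hi+1 replaces exactly that segment:
-- ported by hand as take lo ++ new segment ++ drop (hi+1) (exact on these nonnegative bounds).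
def lampsStepB (ab : Int × Int) (n : Int) (st : List Int) : List Int :=
  let lo := max ab.1 0
  let hi := min ab.2 (n - 1)
  if lo ≤ hi then
    st.take lo.toNat
      ++ (PySem.List.slice st (some lo) (some (hi + 1))).map (fun s => PySem.Int.mod (s + 1) 3)
      ++ st.drop (hi + 1).toNat
  else st

def lampsLoopB (n : Int) : List (Int × Int) → List Int → Int → Int
  | [], _, best => best
  | ab :: rest, st, best =>
    let st' := lampsStepB ab n st
    lampsLoopB n rest st' (max best (st'.count 2 : Int))

def lamps_alt (n : Int) (T : List (Int × Int)) : Int :=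
  lampsLoopB n T (PySem.List.pyRepeat [0] n) 0

-- ===== PRECONDITION & SPEC =====
def Spec_lamps (n : Int) (T : List (Int × Int)) (out : Int) : Prop := out = lamps_alt n T
instance (n : Int) (T : List (Int × Int)) (out : Int) : Decidable (Spec_lamps n T out) := by unfold Spec_lamps; infer_instance

-- ===== CLAIM (what is proved, stated in full; the proofs are below) =====
def Claim_equal_lamps : Prop := ∀ (n : Int) (T : List (Int × Int)), Dom_lamps n T → Spec_lamps n T (lamps n T)

-- ===== LEMMAS AND PROOFS =====

/-- lamp colour as a toggle count mod 3 -/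
def encL (c : Char) : Int := if c = 'G' then 0 else if c = 'R' then 1 else 2

/-- the colour automaton G → R → B → G (A's else branch maps anything else to 'G' too) -/
def nextL (c : Char) : Char := if c = 'G' then 'R' else if c = 'R' then 'B' else 'G'

def okL (c : Char) : Prop := c = 'G' ∨ c = 'R' ∨ c = 'B'

/-- effect of one query (s, e) on the lamp list: positions p with i ≤ p ≤ e, s ≤ p, p < n advance -/
def specMap (n i s e : Int) (st : List Char) : List Char :=
  st.mapIdx (fun p c => if i ≤ (p : Int) ∧ s ≤ (p : Int) ∧ (p : Int) ≤ e ∧ (p : Int) < n then nextL c else c)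

lemma count_set_int (l : List Char) (k : Nat) (x b : Char) (h : k < l.length) :
    ((l.set k x).count b : Int) = (l.count b : Int) + (if x = b then 1 else 0) - (if l[k] = b then 1 else 0) := by
  induction l generalizing k with
  | nil => simp at h
  | cons a t ih =>
    cases k with
    | zero => simp [List.count_cons]; split_ifs <;> simp_all
    | succ m =>
      simp only [List.set_cons_succ, List.count_cons, List.getElem_cons_succ]
      push_cast
      rw [ih m (by simpa using h)]; split_ifs <;> omega

lemma specMap_id (n i s e : Int) (st : List Char)
    (h : ∀ p : Nat, p < st.length → ¬(i ≤ (p : Int) ∧ s ≤ (p : Int) ∧ (p : Int) ≤ e ∧ (p : Int) < n)) :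
    specMap n i s e st = st := by
  unfold specMap
  apply List.ext_getElem (by simp)
  intro p h1 h2
  simp only [List.getElem_mapIdx]
  rw [if_neg (h p (by simpa using h2))]

lemma specMap_set (n i s e : Int) (st : List Char) (hi : 0 ≤ i) (hidx : i.toNat < st.length)
    (hc1 : s ≤ i) (hc2 : i ≤ e) (hc3 : i < n) :
    specMap n (i + 1) s e (st.set i.toNat (nextL (st[i.toNat]))) = specMap n i s e st := by
  unfold specMap
  apply List.ext_getElem (by simp)
  intro p h1 h2
  simp only [List.getElem_mapIdx, List.getElem_set]
  by_cases hp : p = i.toNat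
  · subst hp
    rw [if_pos rfl]
    split_ifs with hA hB <;> first | rfl | (exfalso; omega)
  · rw [if_neg (show ¬(i.toNat = p) from fun hh => hp hh.symm)]
    split_ifs with hA hB <;> first | rfl | (exfalso; omega)

lemma specMap_skip (n i s e : Int) (st : List Char) (_hi : 0 ≤ i)
    (hns : ¬(s ≤ i ∧ i ≤ e ∧ i < n)) :
    specMap n (i + 1) s e st = specMap n i s e st := by
  unfold specMap
  apply List.ext_getElem (by simp)
  intro p h1 h2
  simp only [List.getElem_mapIdx]
  split_ifs with hA hB <;> first | rfl | (exfalso; omega)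

lemma ok_next (c : Char) : okL (nextL c) := by
  unfold nextL okL; split_ifs <;> simp

lemma ok_specMap (n i s e : Int) (st : List Char) (hok : ∀ c ∈ st, okL c) :
    ∀ c ∈ specMap n i s e st, okL c := by
  intro c hc
  obtain ⟨k, hk, hc⟩ := List.exists_of_mem_mapIdx hc
  subst hc
  split_ifs
  · exact ok_next _
  · exact hok _ (List.getElem_mem _)

lemma innerA_spec (s e n : Int) : ∀ (fuel : Nat) (i : Int) (st : Array Char) (cnt : Int),
    (n - i).toNat = fuel → 0 ≤ i → n ≤ (st.size : Int) → (∀ c ∈ st.toList, okL c) →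
    cnt = (st.toList.count 'B' : Int) →
    lampsInnerA s e (PySem.List.pyRange i n 1) st cnt
      = ((specMap n i s e st.toList).toArray, ((specMap n i s e st.toList).count 'B' : Int)) := by
  intro fuel
  induction fuel with
  | zero =>
    intro i st cnt hf hi hlen hok hcnt
    rw [PySem.List.pyRange_one_eq_nil (by omega)]
    have hid : specMap n i s e st.toList = st.toList :=
      specMap_id _ _ _ _ _ (by intro p hp; rintro ⟨h1, h2, h3, h4⟩; simp at hp; omega)
    simp [lampsInnerA, hid, hcnt]
  | succ k ih =>
    intro i st cnt hf hi hlen hok hcnt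
    have hin : i < n := by omega
    rw [PySem.List.pyRange_one_cons hin]
    by_cases hie : i > e
    · have hid : specMap n i s e st.toList = st.toList :=
        specMap_id _ _ _ _ _ (by intro p hp; rintro ⟨h1, h2, h3, h4⟩; omega)
      simp [lampsInnerA, hie, hid, hcnt]
    · have hidx : i.toNat < st.size := by omega
      have hidx' : i.toNat < st.toList.length := by simpa using hidx
      have hget : st[i.toNat]?.getD ' ' = st.toList[i.toNat] := by
        simp [Array.getElem?_eq_getElem hidx]
      have hmemi : st.toList[i.toNat] ∈ st.toList := List.getElem_mem _
      by_cases hs : e ≥ i ∧ i ≥ s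
      · have hokset : ∀ x, okL x → (∀ c ∈ st.toList.set i.toNat x, okL c) := by
          intro x hx c hc
          rcases List.mem_or_eq_of_mem_set hc with h | h
          · exact hok c h
          · exact h ▸ hx
        rcases hok _ hmemi with hG | hR | hB
        · have hstep : lampsInnerA s e (i :: PySem.List.pyRange (i + 1) n 1) st cnt
              = lampsInnerA s e (PySem.List.pyRange (i + 1) n 1) (st.setIfInBounds i.toNat 'R') cnt := by
            simp [lampsInnerA, hie, hs, hget, hG]
          rw [hstep,
            ih (i + 1) _ _ (by omega) (by omega) (by simp; omega)
              (by rw [Array.toList_setIfInBounds]; exact hokset _ (by simp [okL]))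
              (by rw [Array.toList_setIfInBounds, count_set_int st.toList i.toNat 'R' 'B' hidx']
                  simp [hG, hcnt])]
          rw [Array.toList_setIfInBounds,
            show st.toList.set i.toNat 'R' = st.toList.set i.toNat (nextL (st.toList[i.toNat])) by
              rw [hG]; rfl,
            specMap_set n i s e st.toList hi hidx' (by omega) (by omega) hin]
        · have hstep : lampsInnerA s e (i :: PySem.List.pyRange (i + 1) n 1) st cnt
              = lampsInnerA s e (PySem.List.pyRange (i + 1) n 1) (st.setIfInBounds i.toNat 'B') (cnt + 1) := by
            simp [lampsInnerA, hie, hs, hget, hR]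
          rw [hstep,
            ih (i + 1) _ _ (by omega) (by omega) (by simp; omega)
              (by rw [Array.toList_setIfInBounds]; exact hokset _ (by simp [okL]))
              (by rw [Array.toList_setIfInBounds, count_set_int st.toList i.toNat 'B' 'B' hidx']
                  simp [hR, hcnt])]
          rw [Array.toList_setIfInBounds,
            show st.toList.set i.toNat 'B' = st.toList.set i.toNat (nextL (st.toList[i.toNat])) by
              rw [hR]; rfl,
            specMap_set n i s e st.toList hi hidx' (by omega) (by omega) hin]
        · have hstep : lampsInnerA s e (i :: PySem.List.pyRange (i + 1) n 1) st cnt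
              = lampsInnerA s e (PySem.List.pyRange (i + 1) n 1) (st.setIfInBounds i.toNat 'G') (cnt - 1) := by
            simp [lampsInnerA, hie, hs, hget, hB]
          rw [hstep,
            ih (i + 1) _ _ (by omega) (by omega) (by simp; omega)
              (by rw [Array.toList_setIfInBounds]; exact hokset _ (by simp [okL]))
              (by rw [Array.toList_setIfInBounds, count_set_int st.toList i.toNat 'G' 'B' hidx']
                  simp [hB, hcnt])]
          rw [Array.toList_setIfInBounds,
            show st.toList.set i.toNat 'G' = st.toList.set i.toNat (nextL (st.toList[i.toNat])) by
              rw [hB]; rfl,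
            specMap_set n i s e st.toList hi hidx' (by omega) (by omega) hin]
      · have hstep : lampsInnerA s e (i :: PySem.List.pyRange (i + 1) n 1) st cnt
            = lampsInnerA s e (PySem.List.pyRange (i + 1) n 1) st cnt := by
          simp [lampsInnerA, hie, hs]
        rw [hstep, ih (i + 1) st cnt (by omega) (by omega) hlen hok hcnt,
          specMap_skip n i s e st.toList hi (by rintro ⟨h1, h2, h3⟩; exact hs ⟨h2, h1⟩)]

lemma stepB_spec (n : Int) (ab : Int × Int) (st : List Char)
    (hok : ∀ c ∈ st, okL c) (hlen : st.length = n.toNat) :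
    lampsStepB ab n (st.map encL) = (specMap n 0 ab.1 ab.2 st).map encL := by
  unfold lampsStepB
  by_cases hc : max ab.1 0 ≤ min ab.2 (n - 1)
  · rw [if_pos hc, PySem.List.slice_toNat _ (le_max_right _ _) (by omega)]
    have hab : (max ab.1 0).toNat ≤ (min ab.2 (n - 1) + 1).toNat := by omega
    have hbl : (min ab.2 (n - 1) + 1).toNat ≤ st.length := by omega
    apply List.ext_getElem
    · simp [specMap]
      omega
    · intro p hp1 hp2
      have hplen : p < st.length := by simp [specMap] at hp2; omega
      have hok' := hok _ (List.getElem_mem hplen)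
      simp only [specMap, List.getElem_append, List.length_take, List.length_map,
        List.getElem_map, List.getElem_take, List.getElem_drop, List.getElem_mapIdx]
      have hA1 : (max ab.1 0).toNat ≤ n.toNat := by omega
      have hA2 : (min ab.2 (n - 1) + 1).toNat - (max ab.1 0).toNat
          ≤ n.toNat - (max ab.1 0).toNat := by omega
      split_ifs with h1 h2 h3 h4 h5 <;> try (exfalso; omega)
      all_goals try simp only [List.length_append, List.length_take, List.length_map,
        List.length_drop, Nat.min_eq_left (le_trans hab hbl)] at h1
      all_goals try simp only [Nat.min_eq_left (le_trans hab hbl)] at h2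
      all_goals try (exfalso; omega)
      all_goals try simp only [List.length_append, List.length_take, List.length_map,
        List.length_drop, Nat.min_eq_left (le_trans hab hbl),
        Nat.min_eq_left (show (min ab.2 (n - 1) + 1).toNat - (max ab.1 0).toNat
          ≤ st.length - (max ab.1 0).toNat from by omega)]
      all_goals try simp only [show (max ab.1 0).toNat + (p - (max ab.1 0).toNat) = p from by omega]
      all_goals try simp only [show (min ab.2 (n - 1) + 1).toNat
        + (p - ((max ab.1 0).toNat + ((min ab.2 (n - 1) + 1).toNat - (max ab.1 0).toNat))) = p from by omega]
      all_goals first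
        | rfl
        | (rcases hok' with h | h | h <;> rw [h] <;> decide)
  · rw [if_neg hc,
      specMap_id _ _ _ _ _ (by intro p hp; rintro ⟨h1, h2, h3, h4⟩; omega)]

lemma count2_map_enc : ∀ (l : List Char), (∀ c ∈ l, okL c) →
    ((l.map encL).count 2 : Int) = (l.count 'B' : Int) := by
  intro l
  induction l with
  | nil => intro _; simp
  | cons a t ih =>
    intro hok
    have ht := ih (fun c hc => hok c (by simp [hc]))
    simp only [List.map_cons, List.count_cons]
    push_cast
    rw [ht]
    rcases hok a (by simp) with h | h | h <;> simp [h, encL]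

lemma loop_corr (n : Int) : ∀ (T : List (Int × Int)) (st : Array Char) (cnt best : Int),
    (∀ c ∈ st.toList, okL c) → st.size = n.toNat → cnt = (st.toList.count 'B' : Int) → cnt ≤ best →
    lampsOuterA n T st cnt best = lampsLoopB n T (st.toList.map encL) best := by
  intro T
  induction T with
  | nil => intro st cnt best _ _ _ _; rfl
  | cons ab rest ih =>
    intro st cnt best hok hlen hcnt hle
    simp only [lampsOuterA, lampsLoopB]
    rw [innerA_spec ab.1 ab.2 n (n - 0).toNat 0 st cnt rfl le_rfl (by omega) hok hcnt,
      stepB_spec n ab st.toList hok (by simpa using hlen),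
      count2_map_enc _ (ok_specMap n 0 ab.1 ab.2 st.toList hok)]
    have hbest : max ((specMap n 0 ab.1 ab.2 st.toList).count 'B' : Int) (max cnt best)
        = max best ((specMap n 0 ab.1 ab.2 st.toList).count 'B' : Int) := by
      rw [max_eq_right hle, max_comm]
    rw [hbest]
    have hrec := ih (specMap n 0 ab.1 ab.2 st.toList).toArray
      ((specMap n 0 ab.1 ab.2 st.toList).count 'B' : Int)
      (max best ((specMap n 0 ab.1 ab.2 st.toList).count 'B' : Int))
      (by rw [List.toList_toArray]; exact ok_specMap n 0 ab.1 ab.2 st.toList hok)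
      (by simp [specMap]; simpa using hlen)
      (by rw [List.toList_toArray]) (le_max_right _ _)
    rw [hrec, List.toList_toArray]

-- ===== VERDICT (by name: the statement is the Claim_ definition above) =====
theorem lamps_spec : Claim_equal_lamps := by
  intro n T _
  unfold Spec_lamps lamps lamps_alt
  rw [PySem.List.pyRepeat_singleton,
    loop_corr n T (Array.replicate n.toNat 'G') 0 0
      (by intro c hc; rw [Array.toList_replicate] at hc
          simp [List.eq_of_mem_replicate hc, okL])
      (by simp) (by simp [Array.toList_replicate, List.count_replicate]) le_rfl,
    Array.toList_replicate]
  simp [List.map_replicate, encL]
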